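-- pv_equiv track=rewrite | github.com/svofski/mesh-ku | session.py | decode_status_map
-- ===== SOURCE A (Python) =====
-- def decode_status_map(bytes):
--     filemap = []
--     for n in range(len(bytes)):
--         b = bytes[n]
--         for i in range(8):
--             yesno = int((b & 0x80) != 0)
--             filemap.append(yesno)
--             b <<= 1
--     return filemap
-- ===== SOURCE B (Python) =====
-- TABLE = [[(v >> (7 - i)) & 1 for i in range(8)] for v in range(256)]
--
-- def decode_status_map(bytes):
--     filemap = []
--     for b in bytes:
--         filemap.extend(TABLE[b % 256])
--     return filemap
-- ===== Notes on version B (the rewrite author's own statement) =====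
-- stated objective: idiomatic
-- what changed: B precomputes once a 256-entry lookup table mapping each byte value to its 8 MSB-first bits, then makes one flat pass extending the output with TABLE[b % 256], replacing A's nested shift-left-and-mask inner loop with a table lookup.
import Mathlib
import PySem

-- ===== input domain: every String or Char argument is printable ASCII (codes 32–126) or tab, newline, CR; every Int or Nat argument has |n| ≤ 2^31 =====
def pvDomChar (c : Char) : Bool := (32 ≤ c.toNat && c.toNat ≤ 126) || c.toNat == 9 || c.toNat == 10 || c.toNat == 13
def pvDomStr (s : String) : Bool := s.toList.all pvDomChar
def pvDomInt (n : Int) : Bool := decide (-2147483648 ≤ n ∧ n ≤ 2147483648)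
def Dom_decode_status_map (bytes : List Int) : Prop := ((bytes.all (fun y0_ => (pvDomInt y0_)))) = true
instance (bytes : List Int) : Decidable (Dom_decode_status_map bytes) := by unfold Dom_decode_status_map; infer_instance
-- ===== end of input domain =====

-- B precomputes once a 256-entry table of each byte value's 8 MSB-first bits and makes one
-- flat pass extending the output with TABLE[b % 256]; same return value, no speed claim.

-- ===== PORT A =====
def decode_status_map (bytes : List Int) : List Int :=
  (PySem.List.pyRange 0 (PySem.List.len bytes) 1).foldl
    (fun filemap n =>
      ((PySem.List.pyRange 0 8 1).foldl
        (fun st _i =>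
          (st.1 ++ [if PySem.Int.band st.2 128 ≠ 0 then (1 : Int) else 0], st.2 <<< (1 : Nat)))
        (filemap, PySem.List.pyGetD bytes n 0)).1)
    []

-- ===== PORT B =====
-- TABLE = [[(v >> (7 - i)) & 1 for i in range(8)] for v in range(256)]
def pvTable : List (List Int) :=
  (PySem.List.pyRange 0 256 1).map (fun (v : Int) =>
    (PySem.List.pyRange 0 8 1).map (fun (i : Int) => PySem.Int.band (v >>> ((7 : Int) - i).toNat) 1))

def decode_status_map_alt (bytes : List Int) : List Int :=
  bytes.foldl (fun filemap b => filemap ++ PySem.List.pyGetD pvTable (PySem.Int.mod b 256) []) []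

-- ===== PRECONDITION & SPEC =====
def Spec_decode_status_map (bytes : List Int) (out : List Int) : Prop := out = decode_status_map_alt bytes
instance (bytes : List Int) (out : List Int) : Decidable (Spec_decode_status_map bytes out) := by unfold Spec_decode_status_map; infer_instance

-- ===== CLAIM (what is proved, stated in full; the proofs are below) =====
def Claim_equal_decode_status_map : Prop := ∀ (bytes : List Int), Dom_decode_status_map bytes → Spec_decode_status_map bytes (decode_status_map bytes)

-- ===== LEMMAS AND PROOFS =====

-- the common value both sides compute for one byte: its 8 bits, most significant first
def pvMid (b : Int) : List Int :=
  [b / 2 ^ 7 % 2, b / 2 ^ 6 % 2, b / 2 ^ 5 % 2, b / 2 ^ 4 % 2,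
   b / 2 ^ 3 % 2, b / 2 ^ 2 % 2, b / 2 ^ 1 % 2, b / 2 ^ 0 % 2]

-- A's inner-loop bit stream, as a recursion on the remaining iteration count
def pvBitsN : Nat → Int → List Int
  | 0, _ => []
  | n + 1, x => (if PySem.Int.band x 128 ≠ 0 then (1 : Int) else 0) :: pvBitsN n (x <<< (1 : Nat))

theorem pv_band128 (x : Int) : PySem.Int.band x 128 = 128 * (x / 128 % 2) := by
  by_cases hx : 0 ≤ x
  · simp only [PySem.Int.band, if_pos hx, if_pos (by norm_num : (0:Int) ≤ 128)]
    have h1 : x.toNat &&& (128:Int).toNat = (x.toNat.testBit 7).toNat * 2 ^ 7 := by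
      have := Nat.and_two_pow x.toNat 7
      simpa using this
    rw [h1, Nat.toNat_testBit]
    have hx' : x = (x.toNat : Int) := (Int.toNat_of_nonneg hx).symm
    rw [hx']
    push_cast
    omega
  · simp only [PySem.Int.band, if_neg hx, if_pos (by norm_num : (0:Int) ≤ 128)]
    set m := (-x - 1).toNat with hm
    have hxm : x = -(m : Int) - 1 := by simp [hm]; omega
    have h1 : (128:Int).toNat &&& m = (m.testBit 7).toNat * 2 ^ 7 := by
      have := Nat.and_two_pow m 7
      simpa [Nat.and_comm] using this
    rw [h1, Nat.toNat_testBit]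
    rw [hxm]
    push_cast
    omega

theorem pv_mod2 (a : Int) : PySem.Int.mod a 2 = a % 2 :=
  PySem.Int.mod_eq_emod_of_pos (by norm_num)

theorem pv_bit_gen (b : Int) (i k : Nat) (h : i + k = 7) :
    (if PySem.Int.band (b * 2 ^ i) 128 ≠ 0 then (1 : Int) else 0) = b / 2 ^ k % 2 := by
  have h128 : (128 : Int) = 2 ^ i * 2 ^ k := by rw [← pow_add, h]; norm_num
  rw [pv_band128]
  have hdiv : b * 2 ^ i / 128 = b / 2 ^ k := by
    rw [h128, mul_comm b, Int.mul_ediv_mul_of_pos _ _ (by positivity)]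
  rw [hdiv]
  have hr : b / 2 ^ k % 2 = 0 ∨ b / 2 ^ k % 2 = 1 := by omega
  rcases hr with h' | h' <;> simp [h']

theorem pv_sls (x : Int) (i : Nat) : (x <<< (1 : Nat)) <<< i = x <<< (i + 1) := by
  simp only [Int.shiftLeft_eq, pow_succ]
  ring

theorem pvBitsN_eq (n : Nat) : ∀ x : Int,
    pvBitsN n x = (List.range n).map (fun (i : Nat) => if PySem.Int.band (x <<< i) 128 ≠ 0 then (1 : Int) else 0) := by
  induction n with
  | zero => intro x; simp [pvBitsN]
  | succ n ih =>
    intro x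
    rw [List.range_succ_eq_map, List.map_cons, List.map_map]
    rw [pvBitsN, ih (x <<< (1 : Nat))]
    congr 1
    · have : x <<< (0 : Nat) = x := by simp [Int.shiftLeft_eq]
      rw [this]
    · apply List.map_congr_left
      intro i _
      simp only [Function.comp, pv_sls]

theorem pvBitsN_eight (b : Int) : pvBitsN 8 b = pvMid b := by
  rw [pvBitsN_eq]
  rw [show List.range 8 = [0, 1, 2, 3, 4, 5, 6, 7] from by decide]
  simp only [List.map, Int.shiftLeft_eq]
  rw [pv_bit_gen b 0 7 (by norm_num), pv_bit_gen b 1 6 (by norm_num),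
      pv_bit_gen b 2 5 (by norm_num), pv_bit_gen b 3 4 (by norm_num),
      pv_bit_gen b 4 3 (by norm_num), pv_bit_gen b 5 2 (by norm_num),
      pv_bit_gen b 6 1 (by norm_num), pv_bit_gen b 7 0 (by norm_num)]
  rfl

theorem pv_foldl_step (l : List Int) : ∀ (acc : List Int) (x : Int),
    (l.foldl
      (fun st _i =>
        (st.1 ++ [if PySem.Int.band st.2 128 ≠ 0 then (1 : Int) else 0], st.2 <<< (1 : Nat)))
      (acc, x)).1 = acc ++ pvBitsN l.length x := by
  induction l with
  | nil => intro acc x; simp [pvBitsN]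
  | cons h t ih =>
    intro acc x
    simp only [List.foldl_cons, List.length_cons, pvBitsN]
    rw [ih]
    simp [List.append_assoc]

theorem pv_inner_eq (acc : List Int) (b : Int) :
    ((PySem.List.pyRange 0 8 1).foldl
      (fun st _i =>
        (st.1 ++ [if PySem.Int.band st.2 128 ≠ 0 then (1 : Int) else 0], st.2 <<< (1 : Nat)))
      (acc, b)).1 = acc ++ pvMid b := by
  rw [pv_foldl_step]
  rw [show (PySem.List.pyRange 0 8 1).length = 8 from by decide]
  rw [pvBitsN_eight]

-- B-side: the table entry at a byte value 0 ≤ v < 256 is exactly pvMid v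
theorem pv_table_entry (v : Int) (h0 : 0 ≤ v) (h1 : v < 256) :
    PySem.List.pyGetD pvTable v [] = pvMid v := by
  unfold pvTable
  rw [PySem.List.pyGetD_map_pyRange_of_nonneg _ 256 v [] h0 h1]
  rw [show PySem.List.pyRange 0 8 1 = [0, 1, 2, 3, 4, 5, 6, 7] from by decide]
  simp only [List.map, PySem.Int.band_one, pv_mod2, Int.shiftRight_eq_div_pow]
  norm_num [pvMid, show Int.toNat 7 = 7 from rfl, show Int.toNat 6 = 6 from rfl,
    show Int.toNat 5 = 5 from rfl, show Int.toNat 4 = 4 from rfl,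
    show Int.toNat 3 = 3 from rfl, show Int.toNat 2 = 2 from rfl]

-- low 8 bits are unchanged by reducing mod 256
theorem pv_mod256 (b : Int) (k : Nat) (hk : k ≤ 7) : b % 256 / 2 ^ k % 2 = b / 2 ^ k % 2 := by
  have h256 : (256 : Int) = 2 ^ k * 2 ^ (8 - k) := by
    have hk8 : k + (8 - k) = 8 := by omega
    rw [← pow_add, hk8]
    norm_num
  set q := b / 256 with hq
  have hmod : b % 256 = b + (-q) * 256 := by
    have := Int.emod_emod_of_dvd b (dvd_refl 256)
    omega
  rw [hmod]
  have hdiv : (b + (-q) * 256) / 2 ^ k = b / 2 ^ k + (-q) * 2 ^ (8 - k) := by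
    rw [h256]
    rw [show (-q) * (2 ^ k * 2 ^ (8 - k)) = ((-q) * 2 ^ (8 - k)) * 2 ^ k by ring]
    exact Int.add_mul_ediv_right _ _ (by positivity)
  rw [hdiv]
  have heven : (2 : Int) ∣ 2 ^ (8 - k) := dvd_pow_self 2 (by omega)
  obtain ⟨c, hc⟩ := heven
  rw [hc]
  have hre : b / 2 ^ k + (-q) * (2 * c) = b / 2 ^ k + (-q * c) * 2 := by ring
  rw [hre]
  omega

theorem pv_lookup_eq (b : Int) :
    PySem.List.pyGetD pvTable (PySem.Int.mod b 256) [] = pvMid b := by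
  rw [PySem.Int.mod_eq_emod_of_pos (by norm_num : (0:Int) < 256)]
  rw [pv_table_entry (b % 256) (Int.emod_nonneg b (by norm_num)) (Int.emod_lt_of_pos b (by norm_num))]
  unfold pvMid
  simp only [pv_mod256 b 7 (by norm_num), pv_mod256 b 6 (by norm_num),
    pv_mod256 b 5 (by norm_num), pv_mod256 b 4 (by norm_num),
    pv_mod256 b 3 (by norm_num), pv_mod256 b 2 (by norm_num),
    pv_mod256 b 1 (by norm_num), pv_mod256 b 0 (by norm_num)]

theorem pv_alt_eq (bytes : List Int) : decode_status_map_alt bytes = bytes.flatMap pvMid := by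
  unfold decode_status_map_alt
  have hf : (fun (filemap : List Int) (b : Int) => filemap ++ PySem.List.pyGetD pvTable (PySem.Int.mod b 256) [])
      = fun filemap b => filemap ++ pvMid b := by
    funext filemap b
    rw [pv_lookup_eq]
  rw [hf, PySem.List.foldl_append_eq_flatMap]
  simp

-- ===== VERDICT (by name: the statement is the Claim_ definition above) =====
theorem decode_status_map_spec : Claim_equal_decode_status_map := by
  unfold Claim_equal_decode_status_map
  intro bytes _
  unfold Spec_decode_status_map
  unfold decode_status_map
  have hout := PySem.List.foldl_pyRange_pyGetD bytes 0
    (fun (acc : List Int) (b : Int) =>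
      ((PySem.List.pyRange 0 8 1).foldl
        (fun st _i =>
          (st.1 ++ [if PySem.Int.band st.2 128 ≠ 0 then (1 : Int) else 0], st.2 <<< (1 : Nat)))
        (acc, b)).1)
    [] (a := 0) (le_refl 0)
  simp only [Int.toNat_zero, List.drop_zero] at hout
  rw [hout]
  have hf : (fun (acc : List Int) (b : Int) =>
      ((PySem.List.pyRange 0 8 1).foldl
        (fun st _i =>
          (st.1 ++ [if PySem.Int.band st.2 128 ≠ 0 then (1 : Int) else 0], st.2 <<< (1 : Nat)))
        (acc, b)).1) = fun acc b => acc ++ pvMid b := by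
    funext acc b
    exact pv_inner_eq acc b
  rw [hf, PySem.List.foldl_append_eq_flatMap, pv_alt_eq]
  simp
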